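-- pv_equiv track=rewrite | github.com/Adarshb2000/coding | CF_744E1.py | cf_744E
-- ===== SOURCE A (Python) =====
-- from collections import deque
--
-- def cf_744E(numbers):
--     nums = deque()
--     for num in numbers[1 :]:
--         if len(nums) and num > nums[0]:
--             nums.append(num)
--         else:
--             nums.appendleft(num)
--
--
--     return list(nums)
-- ===== SOURCE B (Python) =====
-- def cf_744E(numbers):
--     xs = numbers[1:]
--     # The deque's front is always the running minimum of the processed elements
--     # (a new element becomes the front exactly when it is <= the current front,
--     # which starts as the first processed element).  So an element goes to the
--     # back iff it is strictly greater than the minimum of the elements before it.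
--     # Stage 1: prefix minimum before each position (None before the first).
--     mins = []
--     cur = None
--     for x in xs:
--         mins.append(cur)
--         cur = x if cur is None else min(cur, x)
--     # Stage 2: classify by that characterization and assemble the answer.
--     small = [x for x, m in zip(xs, mins) if m is None or x <= m]
--     big = [x for x, m in zip(xs, mins) if m is not None and x > m]
--     return small[::-1] + big
-- ===== Notes on version B (the rewrite author's own statement) =====
-- stated objective: alternative
-- what changed: Eliminates the deque entirely: B first computes the prefix minima in a scan, then classifies each element by the characterization 'goes to the back iff strictly greater than the minimum of the preceding processed elements' with two filter passes, and assembles reversed(front-group)+back-group; A instead maintains a deque and compares each element to its mutable front.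
import Mathlib
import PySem

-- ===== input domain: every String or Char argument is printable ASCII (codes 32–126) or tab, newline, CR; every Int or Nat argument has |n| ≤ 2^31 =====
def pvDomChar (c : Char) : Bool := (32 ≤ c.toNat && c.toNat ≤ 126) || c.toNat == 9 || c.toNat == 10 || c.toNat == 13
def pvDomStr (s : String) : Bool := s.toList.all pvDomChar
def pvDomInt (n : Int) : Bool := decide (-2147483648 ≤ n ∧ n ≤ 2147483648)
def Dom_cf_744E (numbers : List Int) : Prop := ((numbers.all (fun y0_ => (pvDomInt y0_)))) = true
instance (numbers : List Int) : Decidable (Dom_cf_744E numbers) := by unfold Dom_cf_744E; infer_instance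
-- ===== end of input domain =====

-- B drops the deque: a prefix-minimum scan plus two filter passes, using the fact that
-- the deque's front is always the running minimum (objective: alternative, same cost).

-- ===== PORT A =====
-- deque as a List Int with the front at the head; append = ++ [num], appendleft = cons;
-- nums[0] = headD 0, guarded by the len(nums) test exactly as in the Python.
def cf_744E (numbers : List Int) : List Int :=
  (PySem.List.slice numbers (some 1) none).foldl
    (fun nums num =>
      if nums.length ≠ 0 ∧ num > nums.headD 0 then nums ++ [num] else num :: nums)
    []

-- ===== PORT B =====
-- stage 1 of Source B: the loop appending the running minimum-so-far before each position
def cf744BMins : Option Int → List Int → List (Option Int)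
  | _, [] => []
  | cur, x :: t => cur :: cf744BMins (some (cur.elim x (fun m => min m x))) t

-- stage 2: the two comprehensions over zip(xs, mins), then small[::-1] + big
def cf_744E_alt (numbers : List Int) : List Int :=
  let xs := PySem.List.slice numbers (some 1) none
  let mins := cf744BMins none xs
  let small := ((xs.zip mins).filter (fun p => p.2.elim true (fun m => p.1 ≤ m))).map Prod.fst
  let big := ((xs.zip mins).filter (fun p => p.2.elim false (fun m => m < p.1))).map Prod.fst
  small.reverse ++ big

-- ===== PRECONDITION & SPEC =====
def Spec_cf_744E (numbers : List Int) (out : List Int) : Prop := out = cf_744E_alt numbers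
instance (numbers : List Int) (out : List Int) : Decidable (Spec_cf_744E numbers out) := by unfold Spec_cf_744E; infer_instance

-- ===== CLAIM (what is proved, stated in full; the proofs are below) =====
def Claim_equal_cf_744E : Prop := ∀ (numbers : List Int), Dom_cf_744E numbers → Spec_cf_744E numbers (cf_744E numbers)

-- ===== LEMMAS AND PROOFS =====

-- proof-side abbreviations for B's two filter passes, starting from running minimum `cur`
def cf744Small (cur : Option Int) (l : List Int) : List Int :=
  ((l.zip (cf744BMins cur l)).filter (fun p => p.2.elim true (fun m => p.1 ≤ m))).map Prod.fst

def cf744Big (cur : Option Int) (l : List Int) : List Int :=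
  ((l.zip (cf744BMins cur l)).filter (fun p => p.2.elim false (fun m => m < p.1))).map Prod.fst


theorem cf744_small_cons_none (x : Int) (t : List Int) :
    cf744Small none (x :: t) = x :: cf744Small (some x) t := by
  simp [cf744Small, cf744BMins]

theorem cf744_big_cons_none (x : Int) (t : List Int) :
    cf744Big none (x :: t) = cf744Big (some x) t := by
  simp [cf744Big, cf744BMins]

theorem cf744_small_cons_some (m x : Int) (t : List Int) :
    cf744Small (some m) (x :: t) =
      if x ≤ m then x :: cf744Small (some (min m x)) t else cf744Small (some (min m x)) t := by
  by_cases h : x ≤ m <;> simp [cf744Small, cf744BMins, h]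

theorem cf744_big_cons_some (m x : Int) (t : List Int) :
    cf744Big (some m) (x :: t) =
      if x ≤ m then cf744Big (some (min m x)) t else x :: cf744Big (some (min m x)) t := by
  by_cases h : x ≤ m <;> simp [cf744Big, cf744BMins, h, not_le.mp]

theorem cf744_head_rev {left right : List Int} (h : left ≠ []) :
    (left.reverse ++ right).headD 0 = left.getLastD 0 := by
  induction left using List.reverseRecOn with
  | nil => simp at h
  | append_singleton l x ih => simp

-- main invariant: A's fold from state left.reverse ++ right, where the running minimum
-- cur is none iff nothing was processed (left = right = []) and otherwise equals left's last
theorem cf744_inv (l : List Int) (left right : List Int) (cur : Option Int)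
    (hinv : match cur with
            | none => left = [] ∧ right = []
            | some m => left ≠ [] ∧ left.getLastD 0 = m) :
    l.foldl (fun nums num =>
        if nums.length ≠ 0 ∧ num > nums.headD 0 then nums ++ [num] else num :: nums)
      (left.reverse ++ right)
    = (left ++ cf744Small cur l).reverse ++ (right ++ cf744Big cur l) := by
  induction l generalizing left right cur with
  | nil => simp [cf744Small, cf744Big, cf744BMins]
  | cons x t ih =>
    rw [List.foldl_cons]
    match cur with
    | none =>
      obtain ⟨hl, hr⟩ := hinv; subst hl; subst hr
      rw [if_neg (by simp), cf744_small_cons_none, cf744_big_cons_none]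
      simpa using ih [x] [] (some x) (by simp)
    | some m =>
      obtain ⟨hl, hm⟩ := hinv
      have hne : (left.reverse ++ right).length ≠ 0 := by
        simp only [List.length_append, List.length_reverse]
        intro hc
        exact hl (List.eq_nil_of_length_eq_zero (by omega))
      have hhead : (left.reverse ++ right).headD 0 = m := by rw [cf744_head_rev hl, hm]
      rw [cf744_small_cons_some, cf744_big_cons_some]
      by_cases hc : x ≤ m
      · rw [if_neg (by rw [hhead]; exact fun ⟨_, h2⟩ => absurd h2 (not_lt.mpr hc)),
            if_pos hc, if_pos hc]
        have e : x :: (left.reverse ++ right) = (left ++ [x]).reverse ++ right := by simp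
        rw [e]
        have := ih (left ++ [x]) right (some (min m x)) (by simp [min_eq_right hc])
        simpa [List.append_assoc] using this
      · rw [if_pos ⟨hne, by rw [hhead]; exact not_le.mp hc⟩, if_neg hc, if_neg hc]
        rw [List.append_assoc]
        have := ih left (right ++ [x]) (some (min m x))
          ⟨hl, by rw [hm]; omega⟩
        simpa [List.append_assoc] using this

-- ===== VERDICT (by name: the statement is the Claim_ definition above) =====
theorem cf_744E_spec : Claim_equal_cf_744E := by
  intro numbers _
  unfold Spec_cf_744E cf_744E cf_744E_alt
  simpa [cf744Small, cf744Big] using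
    cf744_inv (PySem.List.slice numbers (some 1) none) [] [] none (by simp)
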